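-- pv_equiv track=rewrite | github.com/sreverter/TPO_programacion1_grupo11 | funciones/funciones_globales.py | checkear_dato_repetido
-- ===== SOURCE A (Python) =====
-- def checkear_dato_repetido(datos_checkear, dato_a_checkear, clave):
--     lista_sin_repetidos = []
--     for dato in datos_checkear:
--         lista_sin_repetidos.append(dato[clave])
--     conjunto_datos = set(lista_sin_repetidos)
--     if dato_a_checkear in conjunto_datos:
--         return True
--     return False
-- ===== SOURCE B (Python) =====
-- def checkear_dato_repetido(datos_checkear, dato_a_checkear, clave):
--     for dato in datos_checkear:
--         if dato[clave] == dato_a_checkear: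
--             return True
--     return False
-- ===== Notes on version B (the rewrite author's own statement) =====
-- stated objective: simpler
-- what changed: B drops A's intermediate list and set entirely: a single direct loop over datos_checkear that returns True on the first dato whose value under clave equals dato_a_checkear, instead of building a list of all values, converting it to a set and testing membership.
import Mathlib
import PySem

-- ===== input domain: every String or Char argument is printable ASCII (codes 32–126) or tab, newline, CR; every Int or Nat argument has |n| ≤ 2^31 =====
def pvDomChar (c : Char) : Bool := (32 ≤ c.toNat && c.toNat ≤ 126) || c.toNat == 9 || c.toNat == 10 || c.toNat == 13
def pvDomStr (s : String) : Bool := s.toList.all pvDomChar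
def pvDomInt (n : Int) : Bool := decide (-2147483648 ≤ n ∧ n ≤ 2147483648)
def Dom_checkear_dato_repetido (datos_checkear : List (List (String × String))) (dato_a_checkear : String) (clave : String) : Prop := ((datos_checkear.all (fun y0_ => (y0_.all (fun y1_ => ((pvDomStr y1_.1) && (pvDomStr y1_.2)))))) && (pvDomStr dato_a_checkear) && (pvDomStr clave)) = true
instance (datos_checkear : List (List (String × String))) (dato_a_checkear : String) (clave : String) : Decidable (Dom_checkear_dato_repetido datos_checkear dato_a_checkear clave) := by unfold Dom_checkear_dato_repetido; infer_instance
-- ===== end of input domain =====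

-- B replaces A's build-list-then-set-then-membership decomposition by one direct
-- short-circuiting scan; proved equal on all inputs where every dato contains clave.
-- ===== PORT A =====
def checkear_dato_repetido (datos_checkear : List (List (String × String))) (dato_a_checkear : String) (clave : String) : Bool :=
  let lista_sin_repetidos :=
    datos_checkear.foldl (fun acc dato => acc ++ [(dato.lookup clave).getD ""]) []
  let conjunto_datos := PySem.Set.ofList lista_sin_repetidos
  if PySem.Set.contains conjunto_datos dato_a_checkear then true else false

-- ===== PORT B =====
def checkear_dato_repetido_alt (datos_checkear : List (List (String × String))) (dato_a_checkear : String) (clave : String) : Bool :=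
  match datos_checkear with
  | [] => false
  | dato :: rest =>
    if (dato.lookup clave).getD "" == dato_a_checkear then true
    else checkear_dato_repetido_alt rest dato_a_checkear clave

-- ===== PRECONDITION & SPEC =====
-- Pre_ excludes exactly the inputs where some dato lacks clave, on which the Python A raises KeyError.
def Pre_checkear_dato_repetido (datos_checkear : List (List (String × String))) (dato_a_checkear : String) (clave : String) : Prop :=
  (datos_checkear.all (fun dato => (dato.lookup clave).isSome)) = true
instance (datos_checkear : List (List (String × String))) (dato_a_checkear : String) (clave : String) : Decidable (Pre_checkear_dato_repetido datos_checkear dato_a_checkear clave) := by unfold Pre_checkear_dato_repetido; infer_instance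
def pvWitness_checkear_dato_repetido : (List (List (String × String))) × String × String :=
  ([[("id", "1"), ("nombre", "ana")], [("id", "2"), ("nombre", "bo")]], "2", "id")
def Spec_checkear_dato_repetido (datos_checkear : List (List (String × String))) (dato_a_checkear : String) (clave : String) (out : Bool) : Prop := out = checkear_dato_repetido_alt datos_checkear dato_a_checkear clave
instance (datos_checkear : List (List (String × String))) (dato_a_checkear : String) (clave : String) (out : Bool) : Decidable (Spec_checkear_dato_repetido datos_checkear dato_a_checkear clave out) := by unfold Spec_checkear_dato_repetido; infer_instance

-- ===== CLAIM (what is proved, stated in full; the proofs are below) =====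
def Claim_equal_checkear_dato_repetido : Prop := ∀ (datos_checkear : List (List (String × String))) (dato_a_checkear : String) (clave : String), Dom_checkear_dato_repetido datos_checkear dato_a_checkear clave → Pre_checkear_dato_repetido datos_checkear dato_a_checkear clave → Spec_checkear_dato_repetido datos_checkear dato_a_checkear clave (checkear_dato_repetido datos_checkear dato_a_checkear clave)

-- ===== LEMMAS AND PROOFS =====
theorem pv_foldl_append_map {α β : Type} (f : α → β) (xs : List α) (acc : List β) :
    xs.foldl (fun acc dato => acc ++ [f dato]) acc = acc ++ xs.map f := by
  induction xs generalizing acc with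
  | nil => simp
  | cons x t ih => simp [List.foldl, ih]

theorem pv_alt_eq_any (datos_checkear : List (List (String × String))) (dato_a_checkear : String) (clave : String) :
    checkear_dato_repetido_alt datos_checkear dato_a_checkear clave
      = datos_checkear.any (fun dato => (dato.lookup clave).getD "" == dato_a_checkear) := by
  induction datos_checkear with
  | nil => rfl
  | cons d t ih =>
    simp only [checkear_dato_repetido_alt, List.any_cons, ih]
    split_ifs with h <;> simp [h]

-- ===== VERDICT (by name: the statement is the Claim_ definition above) =====
theorem checkear_dato_repetido_spec : Claim_equal_checkear_dato_repetido := by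
  intro datos dato clave _ _
  unfold Spec_checkear_dato_repetido checkear_dato_repetido
  rw [pv_alt_eq_any, pv_foldl_append_map]
  rw [Bool.eq_iff_iff]
  simp [List.any_eq_true]
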